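-- pv_equiv track=rewrite | github.com/itsjustsandzz/dee_tee_train | MP-SPDZ/Compiler/dt_unit_tests_util.py | GetSortPerm_plain
-- ===== SOURCE A (Python) =====
-- def GetSortPermSingleGroup_plain (offset, v_plain):
--     V = [ (v_plain[i], i) for i in range(len(v_plain)) ]
--     V.sort()
--     sorted_v_plain, permutation = zip(*V)
--     permutation = [permutation[i] + offset for i in range(len(permutation))]
--     return permutation
--
-- def GetSortPerm_plain (g_plain, v_plain):
--     permutation = []
--     start_ind = 0
--     end_ind = 1
--     n = len(v_plain)
--     for i in range(n):
--         if g_plain[i] == 1: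
--             start_ind = i
--         if g_plain[i+1] == 1:
--             end_ind = i + 1
--             permutation += GetSortPermSingleGroup_plain (start_ind, v_plain[start_ind:end_ind])
--     return permutation
-- ===== SOURCE B (Python) =====
-- def GetSortPerm_plain(g_plain, v_plain):
--     n = len(v_plain)
--     last_end = 0
--     for p in range(1, n + 1):
--         if g_plain[p] == 1:
--             last_end = p
--     decorated = []
--     gid = 0
--     for j in range(last_end):
--         if j >= 1 and g_plain[j] == 1:
--             gid += 1
--         decorated.append((gid, v_plain[j], j))
--     decorated.sort()
--     return [t[2] for t in decorated]
-- ===== Notes on version B (the rewrite author's own statement) =====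
-- stated objective: simpler
-- what changed: Replaces the per-segment helper calls (slice each group, sort (value,index) pairs, shift by offset, concatenate) by one global stable sort of (group_id, value, index) triples, where group_id is a running prefix count of the boundary markers; no helper, no slicing, no offset arithmetic.
import Mathlib
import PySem

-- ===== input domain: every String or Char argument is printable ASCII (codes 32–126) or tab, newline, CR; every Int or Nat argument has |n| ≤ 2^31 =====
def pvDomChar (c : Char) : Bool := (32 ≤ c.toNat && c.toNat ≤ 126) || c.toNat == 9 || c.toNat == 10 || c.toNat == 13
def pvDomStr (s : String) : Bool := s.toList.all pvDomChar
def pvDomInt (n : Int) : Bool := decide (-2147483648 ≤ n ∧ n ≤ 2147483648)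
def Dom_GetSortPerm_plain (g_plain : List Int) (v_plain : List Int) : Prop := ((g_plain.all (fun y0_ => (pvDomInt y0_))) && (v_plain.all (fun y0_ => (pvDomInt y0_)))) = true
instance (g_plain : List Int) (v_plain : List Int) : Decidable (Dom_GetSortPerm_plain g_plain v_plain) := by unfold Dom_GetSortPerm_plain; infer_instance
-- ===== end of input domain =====

-- B replaces A's per-segment slice/sort/offset/concatenate pipeline by one global stable
-- sort of (group_id, value, index) triples with a running prefix count as group_id (objective: simpler).

-- ===== PORT A =====
def GetSortPermSingleGroup_plain (offset : Int) (v_plain : List Int) : List Int :=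
  let V := (PySem.List.pyRange 0 (v_plain.length : Int) 1).map
      (fun i => (PySem.List.pyGetD v_plain i 0, i))
  -- V.sort(): Python sorts (int, int) tuples lexicographically — the key 'toLex' is exactly that order
  let Vs := PySem.List.sorted V (fun t => toLex t) false
  -- zip(*V): the second components (A only calls this with nonempty V, where Python's zip returns)
  let permutation := Vs.map (fun t => t.2)
  (PySem.List.pyRange 0 (permutation.length : Int) 1).map
    (fun i => PySem.List.pyGetD permutation i 0 + offset)

def GetSortPerm_plain (g_plain : List Int) (v_plain : List Int) : List Int :=
  let n : Int := (v_plain.length : Int)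
  ((PySem.List.pyRange 0 n 1).foldl
    (fun (st : List Int × Int × Int) i =>
      let st1 := if PySem.List.pyGetD g_plain i 0 = 1 then (st.1, i, st.2.2) else st
      if PySem.List.pyGetD g_plain (i + 1) 0 = 1 then
        (st1.1 ++ GetSortPermSingleGroup_plain st1.2.1
            (PySem.List.slice v_plain (some st1.2.1) (some (i + 1))), st1.2.1, i + 1)
      else st1)
    ([], 0, 1)).1

-- ===== PORT B =====
def GetSortPerm_plain_alt (g_plain : List Int) (v_plain : List Int) : List Int :=
  let n : Int := (v_plain.length : Int)
  let lastEnd := (PySem.List.pyRange 1 (n + 1) 1).foldl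
      (fun le p => if PySem.List.pyGetD g_plain p 0 = 1 then p else le) 0
  let dec := (PySem.List.pyRange 0 lastEnd 1).foldl
      (fun (st : List (Int × Int × Int) × Int) j =>
        let gid := if 1 ≤ j ∧ PySem.List.pyGetD g_plain j 0 = 1 then st.2 + 1 else st.2
        (st.1 ++ [(gid, PySem.List.pyGetD v_plain j 0, j)], gid))
      (([] : List (Int × Int × Int)), (0 : Int))
  -- decorated.sort(): Python sorts (int, int, int) tuples lexicographically — the nested Lex key is exactly that order
  (PySem.List.sorted dec.1 (fun t => toLex (t.1, toLex t.2)) false).map (fun t => t.2.2)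

-- ===== PRECONDITION & SPEC =====
-- Pre_ excludes exactly the inputs where Python A raises IndexError: A reads g_plain[i+1]
-- for every i < len(v_plain), so it needs len(g_plain) ≥ len(v_plain)+1 unless v_plain is empty.
def Pre_GetSortPerm_plain (g_plain : List Int) (v_plain : List Int) : Prop :=
  v_plain = [] ∨ v_plain.length + 1 ≤ g_plain.length
instance (g_plain : List Int) (v_plain : List Int) : Decidable (Pre_GetSortPerm_plain g_plain v_plain) := by
  unfold Pre_GetSortPerm_plain; infer_instance
def pvWitness_GetSortPerm_plain : List Int × List Int := ([1, 1], [5])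

def Spec_GetSortPerm_plain (g_plain : List Int) (v_plain : List Int) (out : List Int) : Prop :=
  out = GetSortPerm_plain_alt g_plain v_plain
instance (g_plain : List Int) (v_plain : List Int) (out : List Int) : Decidable (Spec_GetSortPerm_plain g_plain v_plain out) := by
  unfold Spec_GetSortPerm_plain; infer_instance

-- ===== CLAIM (what is proved, stated in full; the proofs are below) =====
def Claim_equal_GetSortPerm_plain : Prop := ∀ (g_plain : List Int) (v_plain : List Int), Dom_GetSortPerm_plain g_plain v_plain → Pre_GetSortPerm_plain g_plain v_plain → Spec_GetSortPerm_plain g_plain v_plain (GetSortPerm_plain g_plain v_plain)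

-- ===== LEMMAS AND PROOFS =====

-- g_plain[p] as the loop reads it (all reads are at nonnegative indices; default irrelevant under Pre_)
def pvGv (g : List Int) (p : Nat) : Int := g.getD p 0
-- number of boundary markers at positions 1..j (the group id of index j)
def pvCnt (g : List Int) (j : Nat) : Nat := (List.range' 1 j).countP (fun p => pvGv g p == 1)
-- the boundary positions in (a, n], in increasing order
def pvEs (g : List Int) (n a : Nat) : List Nat :=
  (List.range' (a + 1) (n - a)).filter (fun p => pvGv g p == 1)
-- A's start_ind after i loop iterations
def pvStart (g : List Int) : Nat → Nat
  | 0 => 0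
  | i + 1 => if pvGv g i = 1 then i else pvStart g i
-- the composite sort key of B
def pvKey (t : Int × Int × Int) : Lex (Int × Lex (Int × Int)) := toLex (t.1, toLex t.2)
-- the decorated triples for global indices in [a, b)
def pvDecSeg (g v : List Int) (a b : Nat) : List (Int × Int × Int) :=
  (List.range' a (b - a)).map (fun j => ((pvCnt g j : Int), v.getD j 0, (j : Int)))
-- the (value, local index) pairs A's helper builds
def pvPairs (w : List Int) : List (Int × Int) :=
  (List.range w.length).map (fun k => (w.getD k 0, (k : Int)))
-- the block A emits for the segment [a, e)
def pvSeg (v : List Int) (a e : Nat) : List Int :=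
  GetSortPermSingleGroup_plain (a : Int) (PySem.List.slice v (some (a : Int)) (some (e : Int)))
-- A's result, as chained segments over the ends list
def pvChainA (v : List Int) : Nat → List Nat → List Int
  | _, [] => []
  | a, e :: rest => pvSeg v a e ++ pvChainA v e rest
-- the same chain on the decorated-triples side
def pvChainD (g v : List Int) : Nat → List Nat → List (Int × Int × Int)
  | _, [] => []
  | a, e :: rest => PySem.List.sorted (pvDecSeg g v a e) pvKey false ++ pvChainD g v e rest
-- A's end_ind after m loop iterations
def pvEndA (g : List Int) (m : Nat) : Int := ((pvEs g m 0).map (fun e => (e : Int))).getLastD 1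

theorem pv_map_range_getD {α β : Type} (l : List α) (d : α) (f : α → β) :
    (List.range l.length).map (fun k => f (l.getD k d)) = l.map f := by
  apply List.ext_getElem (by simp)
  intro i h1 h2
  simp [List.getD_eq_getElem?_getD, List.getElem?_eq_getElem (by simpa using h2)]

theorem pv_helper_eq (off : Int) (w : List Int) :
    GetSortPermSingleGroup_plain off w
      = (PySem.List.sorted (pvPairs w) (fun t => toLex t) false).map (fun t => t.2 + off) := by
  simp only [GetSortPermSingleGroup_plain]
  have hV : (PySem.List.pyRange 0 (w.length : Int) 1).map
      (fun i => (PySem.List.pyGetD w i 0, i)) = pvPairs w := by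
    rw [PySem.List.pyRange_one]
    simp [List.map_map, pvPairs, Function.comp_def]
  rw [hV]
  set P := (PySem.List.sorted (pvPairs w) (fun t => toLex t) false).map (fun t => t.2) with hP
  rw [PySem.List.pyRange_one]
  simp only [Int.sub_zero, Int.toNat_natCast, List.map_map]
  have : ∀ k ∈ List.range P.length,
      ((fun i => PySem.List.pyGetD P i 0 + off) ∘ fun (k : Nat) => (0 : Int) + k) k
        = (fun k => P.getD k 0 + off) k := by
    intro k _
    simp
  rw [List.map_congr_left this, pv_map_range_getD P 0 (fun x => x + off), hP, List.map_map]
  rfl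

theorem pv_es_snoc (g : List Int) (m : Nat) :
    pvEs g (m + 1) 0 = pvEs g m 0 ++ (if pvGv g (m + 1) = 1 then [m + 1] else []) := by
  unfold pvEs
  simp only [Nat.sub_zero]
  rw [List.range'_concat, List.filter_append]
  congr 1
  have h1 : 0 + 1 + 1 * m = m + 1 := by omega
  rw [h1]
  by_cases h : pvGv g (m + 1) = 1 <;> simp [h]

theorem pv_endA_snoc (g : List Int) (m : Nat) :
    pvEndA g (m + 1) = if pvGv g (m + 1) = 1 then ((m + 1 : Nat) : Int) else pvEndA g m := by
  unfold pvEndA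
  rw [pv_es_snoc]
  by_cases h : pvGv g (m + 1) = 1 <;> simp [h]

theorem pv_A_loop (g v : List Int) (m : Nat) :
    ((PySem.List.pyRange 0 (m : Int) 1).foldl
      (fun (st : List Int × Int × Int) i =>
        let st1 := if PySem.List.pyGetD g i 0 = 1 then (st.1, i, st.2.2) else st
        if PySem.List.pyGetD g (i + 1) 0 = 1 then
          (st1.1 ++ GetSortPermSingleGroup_plain st1.2.1
              (PySem.List.slice v (some st1.2.1) (some (i + 1))), st1.2.1, i + 1)
        else st1)
      ([], 0, 1))
    = ((pvEs g m 0).flatMap (fun e => pvSeg v (pvStart g e) e), ((pvStart g m : Nat) : Int), pvEndA g m) := by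
  induction m with
  | zero =>
    rw [PySem.List.pyRange_one_eq_nil (by norm_num)]
    simp [pvEs, pvStart, pvEndA]
  | succ k ih =>
    have hc : ((k + 1 : Nat) : Int) = (k : Int) + 1 := by push_cast; ring
    rw [hc, PySem.List.pyRange_one_succ_right (by omega), List.foldl_append, ih]
    simp only [List.foldl_cons, List.foldl_nil]
    have hg : PySem.List.pyGetD g ((k : Nat) : Int) 0 = pvGv g k := by
      rw [PySem.List.pyGetD_natCast]; rfl
    have hg1 : PySem.List.pyGetD g ((k : Int) + 1) 0 = pvGv g (k + 1) := by
      have h2 : ((k : Int) + 1) = ((k + 1 : Nat) : Int) := by push_cast; ring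
      rw [h2, PySem.List.pyGetD_natCast]; rfl
    have hstart : pvStart g (k + 1) = if pvGv g k = 1 then k else pvStart g k := rfl
    have hflat : ∀ h : pvGv g (k + 1) = 1,
        (pvEs g (k + 1) 0).flatMap (fun e => pvSeg v (pvStart g e) e)
          = (pvEs g k 0).flatMap (fun e => pvSeg v (pvStart g e) e)
            ++ pvSeg v (pvStart g (k + 1)) (k + 1) := by
      intro h
      rw [pv_es_snoc]
      simp [h]
    have hflat0 : ∀ _ : ¬ pvGv g (k + 1) = 1,
        (pvEs g (k + 1) 0).flatMap (fun e => pvSeg v (pvStart g e) e)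
          = (pvEs g k 0).flatMap (fun e => pvSeg v (pvStart g e) e) := by
      intro h
      rw [pv_es_snoc]
      simp [h]
    rw [pv_endA_snoc]
    by_cases h1 : pvGv g k = 1 <;> by_cases h2 : pvGv g (k + 1) = 1
    · simp only [hg, hg1, h1, h2, reduceIte]
      rw [hflat h2]
      simp only [hstart, h1, reduceIte, pvSeg]
      push_cast
      rfl
    · simp only [hg, hg1, h1, h2, reduceIte]
      rw [hflat0 h2]
      simp only [hstart, h1, reduceIte]
    · simp only [hg, hg1, h1, h2, reduceIte]
      rw [hflat h2]
      simp only [hstart, h1, reduceIte, pvSeg]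
      push_cast
      rfl
    · simp only [hg, hg1, h1, h2, reduceIte]
      rw [hflat0 h2]
      simp only [hstart, h1, reduceIte]

theorem pv_start_eq (g : List Int) (a e : Nat) (hae : a < e)
    (hgap : ∀ p, a < p → p < e → pvGv g p ≠ 1) (ha : a = 0 ∨ pvGv g a = 1) :
    pvStart g e = a := by
  induction e with
  | zero => omega
  | succ k ih =>
    by_cases h : pvGv g k = 1
    · have hka : k = a := by
        by_contra hne
        exact hgap k (by omega) (by omega) h
      subst hka; simp [pvStart, h]
    · rcases Nat.lt_or_ge a k with hk | hk
      · simp only [pvStart, if_neg h]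
        exact ih (by omega) (fun p h1 h2 => hgap p h1 (by omega))
      · have hka : k = a := by omega
        subst hka
        rcases ha with h0 | hb
        · subst h0; simp [pvStart, h]
        · exact absurd hb h

theorem pv_es_cons (g : List Int) (n a e : Nat) (rest : List Nat) (h : pvEs g n a = e :: rest) :
    a < e ∧ e ≤ n ∧ pvGv g e = 1 ∧ (∀ p, a < p → p < e → pvGv g p ≠ 1) ∧ rest = pvEs g n e := by
  have hmem : e ∈ pvEs g n a := by rw [h]; exact List.mem_cons_self
  have hmem' := hmem
  unfold pvEs at hmem'
  rw [List.mem_filter, List.mem_range'] at hmem'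
  obtain ⟨⟨i, hi, hei⟩, hb⟩ := hmem'
  have hb : pvGv g e = 1 := by simpa using hb
  have hae : a < e := by omega
  have hen : e ≤ n := by omega
  have hsplit : List.range' (a + 1) (n - a) = List.range' (a + 1) (e - a) ++ List.range' (e + 1) (n - e) := by
    have h3 : (e - a) + (n - e) = n - a := by omega
    have h4 : a + 1 + 1 * (e - a) = e + 1 := by omega
    have := List.range'_append (s := a + 1) (m := e - a) (n := n - e) (step := 1)
    rw [h3, h4] at this
    exact this.symm
  unfold pvEs at h
  rw [hsplit, List.filter_append] at h
  set f1 := (List.range' (a + 1) (e - a)).filter (fun p => pvGv g p == 1) with hf1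
  have hf1le : ∀ x ∈ f1, x ≤ e := by
    intro x hx
    have := List.mem_range'.mp (List.mem_of_mem_filter hx)
    omega
  have hpw : f1.Pairwise (· < ·) := by
    rw [hf1]
    exact (List.pairwise_lt_range' 1).filter _
  rcases hf1e : f1 with _ | ⟨x, f1'⟩ <;> rw [hf1e] at h hpw hf1le
  · simp only [List.nil_append] at h
    have : e ∈ List.range' (e + 1) (n - e) := by
      have : e ∈ (List.range' (e + 1) (n - e)).filter (fun p => pvGv g p == 1) := by
        rw [h]; exact List.mem_cons_self
      exact List.mem_of_mem_filter this
    rw [List.mem_range'] at this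
    omega
  · simp only [List.cons_append, List.cons.injEq] at h
    obtain ⟨rfl, hrest⟩ := h
    have hf1nil : f1' = [] := by
      rw [List.eq_nil_iff_forall_not_mem]
      intro y hy
      have h5 : x < y := (List.pairwise_cons.mp hpw).1 y hy
      have h6 : y ≤ x := hf1le y (List.mem_cons_of_mem _ hy)
      omega
    subst hf1nil
    simp only [List.nil_append] at hrest
    refine ⟨hae, hen, hb, ?_, hrest.symm⟩
    intro p h1 h2 hp
    have hpm : p ∈ f1 := by
      rw [hf1, List.mem_filter, List.mem_range']
      exact ⟨⟨p - (a + 1), by omega, by omega⟩, by simp [hp]⟩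
    rw [hf1e] at hpm
    simp at hpm
    omega

theorem pv_cnt_mono (g : List Int) {j j' : Nat} (h : j ≤ j') : pvCnt g j ≤ pvCnt g j' := by
  unfold pvCnt
  have : List.range' 1 j ++ List.range' (1 + j) (j' - j) = List.range' 1 j' := by
    have := List.range'_append (s := 1) (m := j) (n := j' - j) (step := 1)
    simpa [Nat.add_sub_cancel' h] using this
  rw [← this, List.countP_append]; omega

theorem pv_cnt_succ (g : List Int) (j : Nat) :
    pvCnt g (j + 1) = pvCnt g j + (if pvGv g (j + 1) = 1 then 1 else 0) := by
  unfold pvCnt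
  rw [List.range'_concat]
  simp [List.countP_append, List.countP_cons, Nat.add_comm 1 j]

theorem pv_cnt_lt (g : List Int) {j e j' : Nat} (h1 : j < e) (h2 : e ≤ j') (hb : pvGv g e = 1) :
    pvCnt g j < pvCnt g j' := by
  have he : e = (e - 1) + 1 := by omega
  have hs := pv_cnt_succ g (e - 1)
  rw [← he] at hs
  have h3 : pvCnt g j ≤ pvCnt g (e - 1) := pv_cnt_mono g (by omega)
  have h4 : pvCnt g e ≤ pvCnt g j' := pv_cnt_mono g h2
  simp [hb] at hs; omega

theorem pv_cnt_const (g : List Int) {a j e : Nat} (h1 : a ≤ j) (h2 : j < e)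
    (hgap : ∀ p, a < p → p < e → pvGv g p ≠ 1) : pvCnt g j = pvCnt g a := by
  unfold pvCnt
  have : List.range' 1 a ++ List.range' (1 + a) (j - a) = List.range' 1 j := by
    have := List.range'_append (s := 1) (m := a) (n := j - a) (step := 1)
    simpa [Nat.add_sub_cancel' h1] using this
  rw [← this, List.countP_append]
  have : (List.range' (1 + a) (j - a)).countP (fun p => pvGv g p == 1) = 0 := by
    rw [List.countP_eq_zero]
    intro p hp
    rw [List.mem_range'] at hp
    obtain ⟨i, hi, rfl⟩ := hp
    simpa using hgap _ (by omega) (by omega)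
  omega

theorem pv_mem_decSeg (g v : List Int) {a b : Nat} {t : Int × Int × Int}
    (h : t ∈ pvDecSeg g v a b) :
    ∃ j, a ≤ j ∧ j < b ∧ t = ((pvCnt g j : Int), v.getD j 0, (j : Int)) := by
  unfold pvDecSeg at h
  rw [List.mem_map] at h
  obtain ⟨j, hj, rfl⟩ := h
  rw [List.mem_range'] at hj
  obtain ⟨i, hi, rfl⟩ := hj
  exact ⟨a + i, by omega, by omega, by norm_num⟩

theorem pv_decSeg_append (g v : List Int) {a e b : Nat} (h1 : a ≤ e) (h2 : e ≤ b) :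
    pvDecSeg g v a e ++ pvDecSeg g v e b = pvDecSeg g v a b := by
  unfold pvDecSeg
  rw [← List.map_append]
  congr 1
  have h3 : e - a + (b - e) = b - a := by omega
  have := List.range'_append (s := a) (m := e - a) (n := b - e) (step := 1)
  rw [h3] at this
  simpa [Nat.add_sub_cancel' h1] using this

-- strictness helper: a pairwise-(≤ on keys) list whose keys are pairwise distinct is pairwise-<
theorem pv_pairwise_lt_of_le_ne {α κ : Type} [LinearOrder κ] {l : List α} {key : α → κ}
    (h1 : l.Pairwise (fun s t => key s ≤ key t)) (h2 : l.Pairwise (fun s t => key s ≠ key t)) :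
    l.Pairwise (fun s t => key s < key t) :=
  (h1.and h2).imp (fun h => lt_of_le_of_ne h.1 h.2)

theorem pv_key_inj {s t : Int × Int × Int} (h : pvKey s = pvKey t) : s = t := by
  unfold pvKey at h
  rw [toLex_inj, Prod.ext_iff] at h
  obtain ⟨h1, h2⟩ := h
  rw [toLex_inj] at h2
  exact Prod.ext h1 h2

theorem pv_sorted_pairs_pairwise_lt (w : List Int) :
    (PySem.List.sorted (pvPairs w) (fun t => toLex t) false).Pairwise
      (fun s t => toLex s < toLex t) := by
  apply pv_pairwise_lt_of_le_ne (PySem.List.sorted_pairwise _ _)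
  have hsym : ∀ {x y : Int × Int}, toLex x ≠ toLex y → toLex y ≠ toLex x := fun h => h.symm
  rw [List.Perm.pairwise_iff hsym (PySem.List.sorted_perm (pvPairs w) _ false)]
  unfold pvPairs
  rw [List.pairwise_map]
  apply List.pairwise_lt_range.imp
  intro k k' hlt heq
  have h3 := congrArg (fun t : Int × Int => t.2) (toLex_inj.mp heq)
  simp at h3
  omega

theorem pv_sorted_decSeg_pairwise_lt (g v : List Int) (a b : Nat) :
    (PySem.List.sorted (pvDecSeg g v a b) pvKey false).Pairwise (fun s t => pvKey s < pvKey t) := by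
  apply pv_pairwise_lt_of_le_ne (PySem.List.sorted_pairwise _ _)
  have hsym : ∀ {x y : Int × Int × Int}, pvKey x ≠ pvKey y → pvKey y ≠ pvKey x := fun h => h.symm
  rw [List.Perm.pairwise_iff hsym (PySem.List.sorted_perm (pvDecSeg g v a b) pvKey false)]
  unfold pvDecSeg
  rw [List.pairwise_map]
  apply (List.pairwise_lt_range' 1).imp
  intro j j' hlt heq
  have h3 := congrArg (fun t : Int × Int × Int => t.2.2) (pv_key_inj heq)
  simp at h3
  omega

theorem pv_seg_eq (g v : List Int) (a e : Nat) (hae : a < e) (he : e ≤ v.length)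
    (hgap : ∀ p, a < p → p < e → pvGv g p ≠ 1) :
    pvSeg v a e = (PySem.List.sorted (pvDecSeg g v a e) pvKey false).map (fun t => t.2.2) := by
  have hw : PySem.List.slice v (some (a : Int)) (some (e : Int)) = (v.drop a).take (e - a) :=
    PySem.List.slice_natCast v a e
  have hwlen : ((v.drop a).take (e - a)).length = e - a := by
    simp; omega
  have hwget : ∀ k, k < e - a → ((v.drop a).take (e - a)).getD k 0 = v.getD (a + k) 0 := by
    intro k hk
    rw [List.getD_eq_getElem _ _ (by omega : k < ((v.drop a).take (e - a)).length),
        List.getD_eq_getElem _ _ (by omega : a + k < v.length)]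
    simp [Nat.add_comm a k]
  set lift : Int × Int → Int × Int × Int := fun t => ((pvCnt g a : Int), t.1, t.2 + (a : Int)) with hlift
  have hmap : (pvPairs ((v.drop a).take (e - a))).map lift = pvDecSeg g v a e := by
    unfold pvPairs pvDecSeg
    rw [hwlen, List.range'_eq_map_range]
    rw [List.map_map, List.map_map]
    apply List.map_congr_left
    intro k hk
    rw [List.mem_range] at hk
    simp only [Function.comp_apply, hlift]
    rw [hwget k hk, pv_cnt_const g (Nat.le_add_right a k) (by omega) hgap]
    refine Prod.ext rfl (Prod.ext rfl ?_)
    push_cast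
    ring
  have hperm : ((PySem.List.sorted (pvPairs ((v.drop a).take (e - a))) (fun t => toLex t) false).map lift).Perm
      (pvDecSeg g v a e) := by
    rw [← hmap]
    exact (PySem.List.sorted_perm _ _ _).map lift
  have hpw : ((PySem.List.sorted (pvPairs ((v.drop a).take (e - a))) (fun t => toLex t) false).map lift).Pairwise
      (fun s t => pvKey s < pvKey t) := by
    rw [List.pairwise_map]
    apply (pv_sorted_pairs_pairwise_lt _).imp
    intro s t hst
    simp only [hlift, pvKey]
    rw [Prod.Lex.toLex_lt_toLex]
    refine Or.inr ⟨rfl, ?_⟩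
    rw [Prod.Lex.toLex_lt_toLex] at hst ⊢
    rcases hst with h | ⟨h1, h2⟩
    · exact Or.inl h
    · exact Or.inr ⟨h1, by simpa using h2⟩
  rw [PySem.List.sorted_eq_of_perm_of_pairwise_lt _ _ pvKey hperm hpw]
  unfold pvSeg
  rw [hw, pv_helper_eq, List.map_map]
  rfl

theorem pv_flat_eq_chain (g v : List Int) (n : Nat) :
    ∀ (E : List Nat) (a : Nat), pvEs g n a = E → (a = 0 ∨ pvGv g a = 1) →
      E.flatMap (fun e => pvSeg v (pvStart g e) e) = pvChainA v a E := by
  intro E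
  induction E with
  | nil => intro a _ _; rfl
  | cons e rest ih =>
    intro a h ha
    obtain ⟨hae, _, hb, hgap, hrest⟩ := pv_es_cons g n a e rest h
    simp only [List.flatMap_cons, pvChainA]
    rw [pv_start_eq g a e hae hgap ha, ih e hrest.symm (Or.inr hb)]

theorem pv_chainA_to_D (g v : List Int) :
    ∀ (E : List Nat) (a : Nat), pvEs g v.length a = E →
      pvChainA v a E = (pvChainD g v a E).map (fun t => t.2.2) := by
  intro E
  induction E with
  | nil => intro a _; rfl
  | cons e rest ih =>
    intro a h
    obtain ⟨hae, hen, _, hgap, hrest⟩ := pv_es_cons g v.length a e rest h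
    simp only [pvChainA, pvChainD, List.map_append]
    rw [pv_seg_eq g v a e hae hen hgap, ih e hrest.symm]

theorem pv_decomp (g v : List Int) (n : Nat) :
    ∀ (E : List Nat) (a : Nat), pvEs g n a = E →
      (pvChainD g v a E).Perm (pvDecSeg g v a (E.getLastD a)) ∧
      (pvChainD g v a E).Pairwise (fun s t => pvKey s < pvKey t) := by
  intro E
  induction E with
  | nil =>
    intro a _
    constructor
    · simp [pvChainD, pvDecSeg]
    · simp [pvChainD]
  | cons e rest ih =>
    intro a h
    obtain ⟨hae, hen, hb, hgap, hrest⟩ := pv_es_cons g n a e rest h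
    obtain ⟨ihp, ihw⟩ := ih e hrest.symm
    have hL : e ≤ rest.getLastD e := by
      set x := rest.getLastD e with hx
      have hm : x ∈ e :: rest := List.getLastD_mem_cons
      rcases List.mem_cons.mp hm with h1 | h1
      · omega
      · rw [hrest] at h1
        have h2 := (List.mem_filter.mp h1).1
        rw [List.mem_range'] at h2
        obtain ⟨i, _, h3⟩ := h2
        omega
    have hmem_rest : ∀ t ∈ pvChainD g v e rest, ∃ j', e ≤ j' ∧
        t = ((pvCnt g j' : Int), v.getD j' 0, (j' : Int)) := by
      intro t ht
      have := ihp.mem_iff.mp ht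
      obtain ⟨j', h1, h2, h3⟩ := pv_mem_decSeg g v this
      exact ⟨j', h1, h3⟩
    constructor
    · simp only [pvChainD, List.getLastD_cons]
      have h1 := (PySem.List.sorted_perm (pvDecSeg g v a e) pvKey false).append ihp
      rw [pv_decSeg_append g v (Nat.le_of_lt hae) hL] at h1
      exact h1
    · simp only [pvChainD]
      rw [List.pairwise_append]
      refine ⟨pv_sorted_decSeg_pairwise_lt g v a e, ihw, ?_⟩
      intro s hs t ht
      have hs' := (PySem.List.mem_sorted _ _ _ _).mp hs
      obtain ⟨j, hj1, hj2, rfl⟩ := pv_mem_decSeg g v hs'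
      obtain ⟨j', hj', rfl⟩ := hmem_rest t ht
      unfold pvKey
      rw [Prod.Lex.toLex_lt_toLex]
      left
      dsimp only
      exact_mod_cast pv_cnt_lt g hj2 hj' hb

theorem pv_lastEnd_eq (g : List Int) (m : Nat) :
    ((PySem.List.pyRange 1 ((m : Int) + 1) 1).foldl
      (fun le p => if PySem.List.pyGetD g p 0 = 1 then p else le) 0)
    = (((pvEs g m 0).getLastD 0 : Nat) : Int) := by
  induction m with
  | zero =>
    rw [PySem.List.pyRange_one_eq_nil (by norm_num)]
    simp [pvEs]
  | succ k ih =>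
    have hc : ((k + 1 : Nat) : Int) + 1 = ((k : Int) + 1) + 1 := by push_cast; ring
    rw [hc, PySem.List.pyRange_one_succ_right (by omega), List.foldl_append, ih]
    simp only [List.foldl_cons, List.foldl_nil]
    have hg : PySem.List.pyGetD g ((k : Int) + 1) 0 = pvGv g (k + 1) := by
      have : ((k : Int) + 1) = ((k + 1 : Nat) : Int) := by push_cast; ring
      rw [this, PySem.List.pyGetD_natCast]
      rfl
    rw [hg, pv_es_snoc]
    by_cases h : pvGv g (k + 1) = 1
    · simp [h]
    · simp [h]

theorem pv_dec_fold_eq (g v : List Int) (b : Nat) :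
    ((PySem.List.pyRange 0 (b : Int) 1).foldl
      (fun (st : List (Int × Int × Int) × Int) j =>
        let gid := if 1 ≤ j ∧ PySem.List.pyGetD g j 0 = 1 then st.2 + 1 else st.2
        (st.1 ++ [(gid, PySem.List.pyGetD v j 0, j)], gid))
      (([] : List (Int × Int × Int)), (0 : Int)))
    = (pvDecSeg g v 0 b, ((pvCnt g (b - 1) : Nat) : Int)) := by
  induction b with
  | zero =>
    rw [PySem.List.pyRange_one_eq_nil (by norm_num)]
    simp [pvDecSeg, pvCnt]
  | succ k ih =>
    have hc : ((k + 1 : Nat) : Int) = (k : Int) + 1 := by push_cast; ring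
    rw [hc, PySem.List.pyRange_one_succ_right (by omega), List.foldl_append, ih]
    simp only [List.foldl_cons, List.foldl_nil]
    have hg : PySem.List.pyGetD g ((k : Nat) : Int) 0 = pvGv g k := by
      rw [PySem.List.pyGetD_natCast]; rfl
    have hv : PySem.List.pyGetD v ((k : Nat) : Int) 0 = v.getD k 0 := by
      rw [PySem.List.pyGetD_natCast]
    have hgid : (if 1 ≤ ((k : Nat) : Int) ∧ pvGv g k = 1
        then ((pvCnt g (k - 1) : Nat) : Int) + 1 else ((pvCnt g (k - 1) : Nat) : Int))
        = ((pvCnt g k : Nat) : Int) := by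
      rcases Nat.eq_zero_or_pos k with rfl | hk
      · simp [pvCnt]
      · have hk1 : k = (k - 1) + 1 := by omega
        have := pv_cnt_succ g (k - 1)
        rw [← hk1] at this
        by_cases h : pvGv g k = 1
        · simp [h] at this
          simp [h, this]
          omega
        · simp [h] at this
          simp [h, this]
    have hseg : pvDecSeg g v 0 (k + 1) = pvDecSeg g v 0 k
        ++ [((pvCnt g k : Int), v.getD k 0, (k : Int))] := by
      unfold pvDecSeg
      simp only [Nat.sub_zero]
      rw [List.range'_concat, List.map_append]
      norm_num
    simp only [hg, hv]
    rw [hgid, hseg]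
    simp

theorem pv_B_eq (g v : List Int) :
    GetSortPerm_plain_alt g v
      = (PySem.List.sorted (pvDecSeg g v 0 ((pvEs g v.length 0).getLastD 0)) pvKey false).map
          (fun t => t.2.2) := by
  simp only [GetSortPerm_plain_alt]
  rw [pv_lastEnd_eq g v.length, pv_dec_fold_eq g v ((pvEs g v.length 0).getLastD 0)]
  rfl

theorem pv_A_eq (g v : List Int) :
    GetSortPerm_plain g v = pvChainA v 0 (pvEs g v.length 0) := by
  simp only [GetSortPerm_plain]
  rw [pv_A_loop g v v.length]
  exact pv_flat_eq_chain g v v.length (pvEs g v.length 0) 0 rfl (Or.inl rfl)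

-- ===== VERDICT (by name: the statement is the Claim_ definition above) =====
theorem GetSortPerm_plain_spec : Claim_equal_GetSortPerm_plain := by
  intro g v _ _
  unfold Spec_GetSortPerm_plain
  rw [pv_A_eq, pv_B_eq]
  obtain ⟨hperm, hpw⟩ := pv_decomp g v v.length (pvEs g v.length 0) 0 rfl
  rw [pv_chainA_to_D g v (pvEs g v.length 0) 0 rfl]
  rw [PySem.List.sorted_eq_of_perm_of_pairwise_lt _ _ _ hperm hpw]
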